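-- pv_equiv track=rewrite | github.com/jskim7018/leetcode_study | algorithm_study/2026/02/20260216/medium/LC_3839.py | prefixConnected
-- ===== SOURCE A (Python) =====
-- from typing import List
--
-- def prefixConnected(words: List[str], k: int) -> int:
--     groups = set()
--     groups2 = set()
--     for word in words:
--         if len(word) < k:
--             continue
--         prefix = word[:k]
--         if prefix in groups:
--             if prefix not in groups2:
--                 groups2.add(prefix)
--         else:
--             groups.add(prefix)
--
--     return len(groups2)
-- ===== SOURCE B (Python) =====
-- from typing import List
--
-- def prefixConnected(words: List[str], k: int) -> int:
--     prefs = sorted(w[:k] for w in words if len(w) >= k)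
--     total = 0
--     i = 0
--     n = len(prefs)
--     while i < n:
--         run = 1
--         while i + run < n and prefs[i + run] == prefs[i]:
--             run += 1
--         if run >= 2:
--             total += 1
--         i += run
--     return total
-- ===== Notes on version B (the rewrite author's own statement) =====
-- stated objective: alternative
-- what changed: Replaced the single-pass two-set seen-once/seen-twice bookkeeping with sort-then-scan: collect the k-prefixes, sort them, and count maximal runs of length >= 2 in one linear scan of the sorted list.
import Mathlib
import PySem

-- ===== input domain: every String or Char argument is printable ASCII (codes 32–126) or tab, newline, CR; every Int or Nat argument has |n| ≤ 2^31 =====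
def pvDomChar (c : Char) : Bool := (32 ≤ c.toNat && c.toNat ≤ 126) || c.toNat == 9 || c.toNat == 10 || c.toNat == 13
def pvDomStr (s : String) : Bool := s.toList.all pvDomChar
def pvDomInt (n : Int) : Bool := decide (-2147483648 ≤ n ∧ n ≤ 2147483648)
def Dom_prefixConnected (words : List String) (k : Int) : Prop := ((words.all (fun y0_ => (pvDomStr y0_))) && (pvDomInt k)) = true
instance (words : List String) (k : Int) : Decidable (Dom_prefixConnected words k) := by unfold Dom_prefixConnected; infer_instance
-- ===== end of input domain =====

-- B replaces A's single-pass two-set seen-once/seen-twice bookkeeping by sort-then-scan: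
-- sort the k-prefixes and count maximal runs of length ≥ 2; same result, alternative algorithm.

-- ===== PORT A =====
-- A's loop body on one admitted prefix (the two-set branching)
def pvInnerA (st : PySem.Set String × PySem.Set String) (p : String) :
    PySem.Set String × PySem.Set String :=
  if PySem.Set.contains st.1 p then
    if !(PySem.Set.contains st.2 p) then (st.1, PySem.Set.add st.2 p) else st
  else (PySem.Set.add st.1 p, st.2)

def prefixConnected (words : List String) (k : Int) : Int :=
  let st := words.foldl
    (fun st word =>
      if (PySem.Str.len word : Int) < k then st
      else pvInnerA st (PySem.Str.slice word none (some k)))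
    (PySem.Set.empty, PySem.Set.empty)
  PySem.Set.len st.2

-- ===== PORT B =====
-- Source B's outer while over the sorted prefix list; the inner while that extends the
-- current run while elements stay equal is the takeWhile, and 'i += run' is the drop.
def pvRunScan : List String → Int
  | [] => 0
  | a :: rest =>
    let t := rest.takeWhile (fun x => x == a)
    (if 2 ≤ t.length + 1 then (1 : Int) else 0) + pvRunScan (rest.drop t.length)
termination_by l => l.length
decreasing_by simp [List.length_drop]

def prefixConnected_alt (words : List String) (k : Int) : Int :=
  let prefs := PySem.List.sorted
    (words.filterMap (fun w =>
      if k ≤ (PySem.Str.len w : Int) then some (PySem.Str.slice w none (some k)) else none))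
    (fun x => x) false
  pvRunScan prefs

-- ===== PRECONDITION & SPEC =====
def Spec_prefixConnected (words : List String) (k : Int) (out : Int) : Prop := out = prefixConnected_alt words k
instance (words : List String) (k : Int) (out : Int) : Decidable (Spec_prefixConnected words k out) := by unfold Spec_prefixConnected; infer_instance

-- ===== CLAIM (what is proved, stated in full; the proofs are below) =====
def Claim_equal_prefixConnected : Prop := ∀ (words : List String) (k : Int), Dom_prefixConnected words k → Spec_prefixConnected words k (prefixConnected words k)

-- ===== LEMMAS AND PROOFS =====

-- the shared list of admitted prefixes
def pvPrefs (words : List String) (k : Int) : List String :=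
  words.filterMap (fun w =>
    if (PySem.Str.len w : Int) < k then none
    else some (PySem.Str.slice w none (some k)))

theorem pvFoldA (words : List String) (k : Int)
    (st : PySem.Set String × PySem.Set String) :
    words.foldl
      (fun st word =>
        if (PySem.Str.len word : Int) < k then st
        else pvInnerA st (PySem.Str.slice word none (some k))) st
    = (pvPrefs words k).foldl pvInnerA st := by
  induction words generalizing st with
  | nil => rfl
  | cons w ws ih =>
    simp only [pvPrefs, List.filterMap_cons, List.foldl_cons]
    by_cases h : ((w.toList.length : Int) < k)
    · simp only [PySem.Str.len_eq]
      rw [if_pos h, if_pos h]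
      simpa [pvPrefs] using ih st
    · simp only [PySem.Str.len_eq]
      rw [if_neg h, if_neg h]
      simpa [pvPrefs] using ih (pvInnerA st (PySem.Str.slice w none (some k)))

-- B's comprehension produces the same admitted-prefix list
theorem pvPrefsB (words : List String) (k : Int) :
    words.filterMap (fun w =>
      if k ≤ (PySem.Str.len w : Int) then some (PySem.Str.slice w none (some k)) else none)
    = pvPrefs words k := by
  unfold pvPrefs
  congr 1
  funext w
  by_cases h : ((PySem.Str.len w : Int) < k)
  · rw [if_neg (not_le.mpr h), if_pos h]
  · rw [if_pos (not_lt.mp h), if_neg h]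

-- A's loop invariant: groups tracks membership of the processed prefixes, groups2
-- (duplicate-free) tracks exactly the prefixes already seen at least twice.
theorem pvLoopA (P : List String) (pre : List String)
    (g g2 : List String) (hg2 : g2.Nodup)
    (hgm : ∀ x, x ∈ g ↔ x ∈ pre)
    (hg2m : ∀ x, x ∈ g2 ↔ 2 ≤ pre.count x) :
    (P.foldl pvInnerA (g, g2)).2.Nodup ∧
      ∀ x, x ∈ (P.foldl pvInnerA (g, g2)).2 ↔ 2 ≤ (pre ++ P).count x := by
  induction P generalizing pre g g2 with
  | nil => simpa using ⟨hg2, hg2m⟩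
  | cons p P ih =>
    simp only [List.foldl_cons]
    have happ : pre ++ p :: P = (pre ++ [p]) ++ P := by simp
    rw [happ]
    have hcnt : ∀ x, List.count x (pre ++ [p])
        = List.count x pre + (if p = x then 1 else 0) := by
      intro x
      by_cases h : p = x
      · subst h; simp
      · have h2 : x ∉ [p] := by
          intro hm; exact h (Eq.symm (List.mem_singleton.mp hm))
        simp [List.count_append, h, List.count_eq_zero_of_not_mem h2]
    by_cases hp : p ∈ g
    · by_cases hp2 : p ∈ g2
      · -- already counted twice: state unchanged
        have hst : pvInnerA (g, g2) p = (g, g2) := by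
          simp [pvInnerA, PySem.Set.contains_eq_listContains, hp, hp2]
        rw [hst]
        refine ih (pre ++ [p]) g g2 hg2 (fun x => ?_) (fun x => ?_)
        · rw [hgm, List.mem_append, List.mem_singleton]
          exact ⟨Or.inl, fun hx => hx.elim id (fun he => he ▸ (hgm p).mp hp)⟩
        · rw [hg2m, hcnt]
          by_cases hxp : p = x
          · subst hxp
            have h2 := (hg2m p).mp hp2
            omega
          · simp [hxp]
      · -- second sighting: add to groups2
        have hst : pvInnerA (g, g2) p = (g, g2 ++ [p]) := by
          simp [pvInnerA, PySem.Set.contains_eq_listContains, hp, hp2]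
        rw [hst]
        have hc1 : List.count p pre = 1 := by
          have h1 : 0 < List.count p pre := List.count_pos_iff.mpr ((hgm p).mp hp)
          have h2 : ¬ 2 ≤ List.count p pre := fun h => hp2 ((hg2m p).mpr h)
          omega
        refine ih (pre ++ [p]) g (g2 ++ [p]) ?_ (fun x => ?_) (fun x => ?_)
        · exact List.Nodup.append hg2 (List.nodup_singleton p)
            (List.disjoint_singleton.mpr hp2)
        · rw [hgm, List.mem_append, List.mem_singleton]
          exact ⟨Or.inl, fun hx => hx.elim id (fun he => he ▸ (hgm p).mp hp)⟩
        · rw [List.mem_append, List.mem_singleton, hg2m, hcnt]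
          by_cases hxp : p = x
          · subst hxp; simp [hc1]
          · have hpx : x ≠ p := fun h => hxp h.symm
            simp [hxp, hpx]
    · -- first sighting: add to groups
      have hst : pvInnerA (g, g2) p = (g ++ [p], g2) := by
        simp [pvInnerA, PySem.Set.contains_eq_listContains, hp]
      rw [hst]
      have hc0 : List.count p pre = 0 := by
        rw [List.count_eq_zero]; exact fun h => hp ((hgm p).mpr h)
      refine ih (pre ++ [p]) (g ++ [p]) g2 hg2 (fun x => ?_) (fun x => ?_)
      · simp [hgm]
      · rw [hg2m, hcnt]
        by_cases hxp : p = x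
        · subst hxp; simp [hc0]
        · simp [hxp]

-- run-scan on a nondecreasing list counts the distinct values of multiplicity ≥ 2
-- drop-after-takeWhile is dropWhile (used to rewrite the port's scan step)
theorem pvDropTake (q : String → Bool) (m : List String) :
    m.drop (m.takeWhile q).length = m.dropWhile q := by
  induction m with
  | nil => rfl
  | cons x xs ihm =>
    by_cases h : q x
    · simpa [h] using ihm
    · simp [h]

-- a cannot survive its own dropWhile on a nondecreasing list bounded below by a
theorem pvNotMemDrop (a : String) (m : List String) (hp : m.Pairwise (· ≤ ·))
    (hle : ∀ y ∈ m, a ≤ y) : a ∉ m.dropWhile (fun x => x == a) := by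
  induction m with
  | nil => simp
  | cons x xs ih =>
    by_cases h : (x == a) = true
    · rw [List.dropWhile_cons, if_pos h]
      exact ih (List.pairwise_cons.mp hp).2 (fun y hy => hle y (List.mem_cons_of_mem _ hy))
    · rw [List.dropWhile_cons, if_neg h]
      intro hmem
      have hxa : x ≠ a := fun he => h (by simp [he])
      rcases List.mem_cons.mp hmem with rfl | hxs
      · exact hxa rfl
      · have hx_le : x ≤ a := (List.pairwise_cons.mp hp).1 a hxs
        have ha_le_x : a ≤ x := hle x List.mem_cons_self
        exact hxa (le_antisymm hx_le ha_le_x)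

theorem pvRunScanAux : ∀ (n : Nat) (l : List String), l.length ≤ n → l.Pairwise (· ≤ ·) →
    pvRunScan l = ((l.toFinset.filter (fun x => 2 ≤ l.count x)).card : Int) := by
  intro n
  induction n with
  | zero =>
    intro l hl _
    have : l = [] := List.eq_nil_of_length_eq_zero (Nat.le_zero.mp hl)
    subst this
    simp [pvRunScan]
  | succ n ihn =>
    intro l hl hs
    match l with
    | [] => simp [pvRunScan]
    | a :: rest =>
    have hdw := pvDropTake
    set t := rest.takeWhile (fun x => x == a) with ht
    set d := rest.dropWhile (fun x => x == a) with hd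
    have hsplit : t ++ d = rest := List.takeWhile_append_dropWhile
    have ha_le : ∀ y ∈ rest, a ≤ y := by
      intro y hy; exact (List.pairwise_cons.mp hs).1 y hy
    have hrest : rest.Pairwise (· ≤ ·) := (List.pairwise_cons.mp hs).2
    have hd_pair : d.Pairwise (· ≤ ·) := hrest.sublist (List.dropWhile_sublist _)
    have ht_mem : ∀ x ∈ t, x = a := by
      intro x hx
      have := List.mem_takeWhile_imp hx
      exact eq_of_beq this
    have ha_not_d : a ∉ d := by
      rw [hd]
      exact pvNotMemDrop a rest hrest ha_le
    have hct : t.count a = t.length := List.count_eq_length.mpr (fun b hb => (ht_mem b hb).symm)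
    have hcd : d.count a = 0 := List.count_eq_zero_of_not_mem ha_not_d
    have hca : (a :: rest).count a = 1 + t.length := by
      rw [← hsplit]
      simp [List.count_append, hct, hcd]
      omega
    have hcx : ∀ x, x ≠ a → (a :: rest).count x = d.count x := by
      intro x hx
      have hcxt : t.count x = 0 := by
        rw [List.count_eq_zero]
        intro hxt; exact hx (ht_mem x hxt)
      rw [← hsplit]
      simp [List.count_cons, List.count_append, hcxt]
      exact fun h => hx h.symm
    have hset : (a :: rest).toFinset = insert a d.toFinset := by
      ext x
      simp only [List.toFinset_cons, Finset.mem_insert, List.mem_toFinset]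
      constructor
      · rintro (rfl | hx)
        · exact Or.inl rfl
        · rw [← hsplit] at hx
          rcases List.mem_append.mp hx with hx | hx
          · exact Or.inl (ht_mem x hx)
          · exact Or.inr hx
      · rintro (rfl | hx)
        · exact Or.inl rfl
        · exact Or.inr (by rw [← hsplit]; exact List.mem_append.mpr (Or.inr hx))
    have hfc : Finset.filter (fun x => 2 ≤ (a :: rest).count x) d.toFinset
        = Finset.filter (fun x => 2 ≤ d.count x) d.toFinset := by
      apply Finset.filter_congr
      intro x hx
      have hxa : x ≠ a := by
        intro h; exact ha_not_d (h ▸ List.mem_toFinset.mp hx)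
      rw [hcx x hxa]
    have hdlen : d.length ≤ n := by
      have h1 : d.length ≤ rest.length := (List.dropWhile_sublist _).length_le
      have h2 : rest.length + 1 ≤ n + 1 := by simpa using hl
      omega
    have ih := ihn d hdlen hd_pair
    have hscan : pvRunScan (a :: rest)
        = (if 2 ≤ t.length + 1 then (1 : Int) else 0) + pvRunScan d := by
      simp only [pvRunScan]
      rw [ht, hd, hdw]
    rw [hscan, ih, hset, Finset.filter_insert, hca, hfc]
    by_cases hl : 1 ≤ t.length
    · rw [if_pos (by omega), if_pos (by omega), Finset.card_insert_of_notMem]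
      · push_cast; ring
      · intro hmem
        exact ha_not_d (List.mem_toFinset.mp (Finset.mem_of_mem_filter a hmem))
    · rw [if_neg (by omega), if_neg (by omega)]
      simp

theorem pvMain (words : List String) (k : Int) :
    prefixConnected words k = prefixConnected_alt words k := by
  unfold prefixConnected prefixConnected_alt
  rw [pvFoldA, pvPrefsB]
  set P := pvPrefs words k with hP
  set S := PySem.List.sorted P (fun x => x) false with hS
  have hperm : S.Perm P := PySem.List.sorted_perm P (fun x => x) false
  have hpair : S.Pairwise (· ≤ ·) := by
    simpa using PySem.List.sorted_pairwise P (fun x => x)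
  obtain ⟨hnd, hmem⟩ := pvLoopA P [] [] [] List.nodup_nil
    (fun x => by simp) (fun x => by simp)
  simp only [List.nil_append] at hmem
  have hA : (P.foldl pvInnerA ([], [])).2.length
      = (P.toFinset.filter (fun x => 2 ≤ P.count x)).card := by
    rw [← List.toFinset_card_of_nodup hnd]
    congr 1
    ext x
    simp only [List.mem_toFinset, Finset.mem_filter, hmem]
    constructor
    · intro h
      exact ⟨List.count_pos_iff.mp (by omega), h⟩
    · rintro ⟨_, h⟩; exact h
  have hB : pvRunScan S = ((P.toFinset.filter (fun x => 2 ≤ P.count x)).card : Int) := by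
    rw [pvRunScanAux S.length S le_rfl hpair, List.toFinset_eq_of_perm S P hperm]
    congr 1
    congr 1
    apply Finset.filter_congr
    intro x _
    rw [hperm.count_eq]
  show ((P.foldl pvInnerA (PySem.Set.empty, PySem.Set.empty)).2.len : Int) = pvRunScan S
  rw [PySem.Set.len, hB]
  exact_mod_cast hA

-- ===== VERDICT (by name: the statement is the Claim_ definition above) =====
theorem prefixConnected_spec : Claim_equal_prefixConnected := by
  intro words k _
  exact pvMain words k
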